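-- pv_equiv track=rewrite | github.com/criseulises/75daysLeetCode | python/2.GreatestCommonDivisorOfStrings.py | greatestCommonDivisorOfStrings
-- ===== SOURCE A (Python) =====
-- def greatestCommonDivisorOfStrings(str1, str2):
--     a = max(len(str1), len(str2))
--     b = len(str2) if a != len(str2) else len(str1)
--
--     while b != 0:
--         temp = b
--         b = a % b
--         a = temp
--
--     return str1[:a] if str1 + str2 == str2 + str1 else ""
-- ===== SOURCE B (Python) =====
-- def greatestCommonDivisorOfStrings(str1, str2):
--     m, n = len(str1), len(str2)
--     for d in range(max(m, n), 0, -1):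
--         if m % d == 0 and n % d == 0:
--             cand = str1[:d]
--             if cand * (m // d) == str1 and cand * (n // d) == str2:
--                 return cand
--     return ""
-- ===== Notes on version B (the rewrite author's own statement) =====
-- stated objective: alternative
-- what changed: Replaces the Euclidean gcd-of-lengths plus the concatenation identity str1+str2==str2+str1 by a downward scan over candidate prefix lengths d dividing both lengths, validating each candidate by explicit repetition (cand * k == s) and returning the first (largest) valid one.
import Mathlib
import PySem

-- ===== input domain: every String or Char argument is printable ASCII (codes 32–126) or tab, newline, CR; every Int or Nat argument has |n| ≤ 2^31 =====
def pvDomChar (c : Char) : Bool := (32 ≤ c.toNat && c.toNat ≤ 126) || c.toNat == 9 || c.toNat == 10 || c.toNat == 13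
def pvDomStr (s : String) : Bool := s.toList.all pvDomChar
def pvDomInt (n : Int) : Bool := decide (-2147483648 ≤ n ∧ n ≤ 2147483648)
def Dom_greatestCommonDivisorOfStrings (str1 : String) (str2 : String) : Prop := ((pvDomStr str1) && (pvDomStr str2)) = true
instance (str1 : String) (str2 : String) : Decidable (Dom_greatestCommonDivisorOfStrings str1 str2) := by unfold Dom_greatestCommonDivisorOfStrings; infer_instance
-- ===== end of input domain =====

-- B replaces A's Euclidean gcd of lengths + the concatenation identity by a downward scan over
-- candidate prefix lengths validated by explicit repetition (objective: alternative algorithm).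

-- ===== PORT A =====
-- the `while b != 0` loop of A (lengths are nonnegative, so Nat `%` is Python `%` here)
def gcdsWhile (a b : Nat) : Nat :=
  if b = 0 then a else gcdsWhile b (a % b)
decreasing_by exact Nat.mod_lt _ (Nat.pos_of_ne_zero (by assumption))

def greatestCommonDivisorOfStrings (str1 : String) (str2 : String) : String :=
  let a := max str1.toList.length str2.toList.length
  let b := if a ≠ str2.toList.length then str2.toList.length else str1.toList.length
  let a := gcdsWhile a b
  -- str1 + str2 == str2 + str1, on code points (Python string concatenation/equality, exact)
  if str1.toList ++ str2.toList = str2.toList ++ str1.toList then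
    PySem.Str.slice str1 none (some (a : Int))   -- str1[:a]
  else ""

-- ===== PORT B =====
-- the `for d in range(max(m, n), 0, -1)` loop of Source B; `cand * k == s` is ported as
-- (List.replicate k cand).flatten = s (Python string repetition on code points, exact)
def gcdsScan (l1 l2 : List Char) : Nat → String
  | 0 => ""
  | e + 1 =>
    if l1.length % (e + 1) = 0 ∧ l2.length % (e + 1) = 0 then
      let cand := l1.take (e + 1)
      if (List.replicate (l1.length / (e + 1)) cand).flatten = l1 ∧
         (List.replicate (l2.length / (e + 1)) cand).flatten = l2 then
        String.ofList cand
      else gcdsScan l1 l2 e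
    else gcdsScan l1 l2 e

def greatestCommonDivisorOfStrings_alt (str1 : String) (str2 : String) : String :=
  gcdsScan str1.toList str2.toList (max str1.toList.length str2.toList.length)

-- ===== PRECONDITION & SPEC =====
def Spec_greatestCommonDivisorOfStrings (str1 : String) (str2 : String) (out : String) : Prop := out = greatestCommonDivisorOfStrings_alt str1 str2
instance (str1 : String) (str2 : String) (out : String) : Decidable (Spec_greatestCommonDivisorOfStrings str1 str2 out) := by unfold Spec_greatestCommonDivisorOfStrings; infer_instance

-- ===== CLAIM (what is proved, stated in full; the proofs are below) =====
def Claim_equal_greatestCommonDivisorOfStrings : Prop := ∀ (str1 : String) (str2 : String), Dom_greatestCommonDivisorOfStrings str1 str2 → Spec_greatestCommonDivisorOfStrings str1 str2 (greatestCommonDivisorOfStrings str1 str2)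

-- ===== LEMMAS AND PROOFS =====

-- A's while loop is Euclid's algorithm
theorem gcdsWhile_eq (a b : Nat) : gcdsWhile a b = Nat.gcd b a := by
  induction a, b using gcdsWhile.induct with
  | case1 a => rw [gcdsWhile]; simp
  | case2 a b hb ih =>
    rw [gcdsWhile]
    simp only [hb, if_false]
    rw [ih]
    exact (Nat.gcd_rec b a).symm

-- `(List.replicate k t).flatten` is t repeated k times ("t^k")
theorem repPow_add (t : List Char) (j k : Nat) :
    (List.replicate (j + k) t).flatten = (List.replicate j t).flatten ++ (List.replicate k t).flatten := by
  rw [List.replicate_add, List.flatten_append]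

theorem length_repPow (t : List Char) (k : Nat) : ((List.replicate k t).flatten).length = k * t.length := by
  simp [List.length_flatten]

-- if l1 and l2 are both powers of a common word, they commute
theorem repPow_comm (t l1 l2 : List Char) (k1 k2 : Nat)
    (h1 : l1 = (List.replicate k1 t).flatten) (h2 : l2 = (List.replicate k2 t).flatten) :
    l1 ++ l2 = l2 ++ l1 := by
  subst h1 h2
  rw [← repPow_add, ← repPow_add, Nat.add_comm]

-- commuting lists are powers of a common word of length gcd of the lengths
theorem comm_pow_aux : ∀ n (l1 l2 : List Char), l1.length + l2.length ≤ n →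
    l1 ++ l2 = l2 ++ l1 →
    ∃ t k1 k2, t.length = Nat.gcd l1.length l2.length ∧
      l1 = (List.replicate k1 t).flatten ∧ l2 = (List.replicate k2 t).flatten := by
  intro n
  induction n with
  | zero =>
    intro l1 l2 hn _
    have h1 : l1 = [] := by cases l1 <;> simp_all
    have h2 : l2 = [] := by cases l2 <;> simp_all
    exact ⟨[], 0, 0, by simp [h1, h2]⟩
  | succ n ih =>
    intro l1 l2 hn h
    rcases eq_or_ne l1 [] with rfl | h1
    · exact ⟨l2, 0, 1, by simp⟩
    rcases eq_or_ne l2 [] with rfl | h2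
    · exact ⟨l1, 1, 0, by simp⟩
    have hp1 : 0 < l1.length := List.length_pos_iff.mpr h1
    have hp2 : 0 < l2.length := List.length_pos_iff.mpr h2
    rcases le_or_gt l1.length l2.length with hle | hlt
    · -- l1 is a prefix of l2 : l2 = l1 ++ r, and l1 commutes with r
      have hpre : l1 = l2.take l1.length := by
        have := congrArg (List.take l1.length) h
        simpa [List.take_append_of_le_length hle, List.take_left] using this
      have hr : l2 = l1 ++ l2.drop l1.length := by
        conv_lhs => rw [← List.take_append_drop l1.length l2, ← hpre]
      set r := l2.drop l1.length with hrdef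
      have hrl : r.length = l2.length - l1.length := by simp [hrdef]
      have hcomm : l1 ++ r = r ++ l1 := by
        have h' := h
        rw [hr] at h'
        simpa [List.append_assoc] using h'
      obtain ⟨t, k1, kr, ht, hl1, hrp⟩ := ih l1 r (by omega) hcomm
      refine ⟨t, k1, k1 + kr, ?_, hl1, ?_⟩
      · rw [ht, hrl, Nat.gcd_sub_self_right hle]
      · rw [hr, repPow_add, ← hl1, ← hrp]
    · -- symmetric: l2 is a prefix of l1 : l1 = l2 ++ r, and l2 commutes with r
      have hle : l2.length ≤ l1.length := le_of_lt hlt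
      have hpre : l2 = l1.take l2.length := by
        have := congrArg (List.take l2.length) h.symm
        simpa [List.take_append_of_le_length hle, List.take_left] using this
      have hr : l1 = l2 ++ l1.drop l2.length := by
        conv_lhs => rw [← List.take_append_drop l2.length l1, ← hpre]
      set r := l1.drop l2.length with hrdef
      have hrl : r.length = l1.length - l2.length := by simp [hrdef]
      have hcomm : l2 ++ r = r ++ l2 := by
        have h' := h.symm
        rw [hr] at h'
        simpa [List.append_assoc] using h'
      obtain ⟨t, k2, kr, ht, hl2, hrp⟩ := ih l2 r (by omega) hcomm
      refine ⟨t, k2 + kr, k2, ?_, ?_, hl2⟩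
      · rw [ht, hrl, Nat.gcd_sub_self_right hle, Nat.gcd_comm]
      · rw [hr, repPow_add, ← hl2, ← hrp]

theorem comm_pow (l1 l2 : List Char) (h : l1 ++ l2 = l2 ++ l1) :
    ∃ t k1 k2, t.length = Nat.gcd l1.length l2.length ∧
      l1 = (List.replicate k1 t).flatten ∧ l2 = (List.replicate k2 t).flatten :=
  comm_pow_aux (l1.length + l2.length) l1 l2 le_rfl h

-- the body condition of B's scan at candidate length d
def scanCond (l1 l2 : List Char) (d : Nat) : Prop :=
  (l1.length % d = 0 ∧ l2.length % d = 0) ∧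
  ((List.replicate (l1.length / d) (l1.take d)).flatten = l1 ∧
   (List.replicate (l2.length / d) (l1.take d)).flatten = l2)

theorem gcdsScan_none (l1 l2 : List Char) (D : Nat)
    (hnone : ∀ d, 1 ≤ d → d ≤ D → ¬ scanCond l1 l2 d) :
    gcdsScan l1 l2 D = "" := by
  induction D with
  | zero => rfl
  | succ e ihe =>
    simp only [gcdsScan]
    have hnc := hnone (e + 1) (by omega) le_rfl
    have hrec : ∀ d, 1 ≤ d → d ≤ e → ¬ scanCond l1 l2 d := fun d h1 h2 => hnone d h1 (by omega)
    split_ifs with hm hrep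
    · exact absurd ⟨hm, hrep⟩ hnc
    · exact ihe hrec
    · exact ihe hrec

theorem gcdsScan_hit (l1 l2 : List Char) (D g : Nat)
    (hg : scanCond l1 l2 g) (hg1 : 1 ≤ g) (hgD : g ≤ D)
    (habove : ∀ d, g < d → d ≤ D → ¬ scanCond l1 l2 d) :
    gcdsScan l1 l2 D = String.ofList (l1.take g) := by
  induction D with
  | zero => omega
  | succ e ihe =>
    simp only [gcdsScan]
    rcases eq_or_lt_of_le hgD with heq | hlt
    · -- g = e + 1 : both tests succeed
      subst heq
      rw [if_pos hg.1, if_pos hg.2]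
    · have hnc := habove (e + 1) (by omega) le_rfl
      have step : gcdsScan l1 l2 e = String.ofList (l1.take g) :=
        ihe (by omega) (fun d hd1 hd2 => habove d hd1 (by omega))
      split_ifs with hm hrep
      · exact absurd ⟨hm, hrep⟩ hnc
      · exact step
      · exact step

-- any hit of B's scan condition means the two strings commute
theorem scanCond_comm (l1 l2 : List Char) (d : Nat) (h : scanCond l1 l2 d) :
    l1 ++ l2 = l2 ++ l1 :=
  repPow_comm (l1.take d) l1 l2 _ _ h.2.1.symm h.2.2.symm

-- A's chosen variables compute the gcd of the two lengths
theorem gcdsWhile_max (n1 n2 : Nat) :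
    gcdsWhile (max n1 n2) (if max n1 n2 ≠ n2 then n2 else n1) = Nat.gcd n1 n2 := by
  rw [gcdsWhile_eq]
  by_cases hm : max n1 n2 = n2
  · rw [if_neg (by simp [hm]), hm]
  · have : max n1 n2 = n1 := by omega
    rw [if_pos hm, this, Nat.gcd_comm]

-- the scan condition holds at the gcd of the lengths when the strings commute and l1 ≠ []
theorem scanCond_gcd (l1 l2 : List Char) (h : l1 ++ l2 = l2 ++ l1) (h1 : l1 ≠ []) :
    scanCond l1 l2 (Nat.gcd l1.length l2.length) := by
  obtain ⟨t, k1, k2, ht, hl1, hl2⟩ := comm_pow l1 l2 h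
  set g := Nat.gcd l1.length l2.length with hgdef
  have hp1 : 0 < l1.length := List.length_pos_iff.mpr h1
  have hgpos : 0 < g := Nat.gcd_pos_of_pos_left _ hp1
  have htpos : 0 < t.length := ht ▸ hgpos
  have hn1 : l1.length = k1 * t.length := by rw [hl1, length_repPow]
  have hn2 : l2.length = k2 * t.length := by rw [hl2, length_repPow]
  have hk1 : 0 < k1 := Nat.pos_of_ne_zero (by rintro rfl; rw [Nat.zero_mul] at hn1; omega)
  -- the g-prefix of l1 is t
  have htake : l1.take g = t := by
    have : l1 = t ++ (List.replicate (k1 - 1) t).flatten := by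
      rw [hl1]
      have : k1 = 1 + (k1 - 1) := by omega
      rw [this, repPow_add]
      simp
    rw [this, ← ht, List.take_left]
  have hd1 : l1.length / g = k1 := by rw [hn1, ht]; exact Nat.mul_div_cancel _ hgpos
  have hd2 : l2.length / g = k2 := by rw [hn2, ht]; exact Nat.mul_div_cancel _ hgpos
  refine ⟨⟨?_, ?_⟩, ?_, ?_⟩
  · rw [hn1, ht]; exact Nat.mul_mod_left _ _
  · rw [hn2, ht]; exact Nat.mul_mod_left _ _
  · rw [hd1, htake, hl1]
  · rw [hd2, htake, hl2]

-- no candidate strictly above the gcd can divide both lengths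
theorem scanCond_above (l1 l2 : List Char) (d : Nat) (h1 : l1 ≠ [])
    (hd : Nat.gcd l1.length l2.length < d) : ¬ scanCond l1 l2 d := by
  rintro ⟨⟨hm1, hm2⟩, -⟩
  have hp1 : 0 < l1.length := List.length_pos_iff.mpr h1
  have hgpos : 0 < Nat.gcd l1.length l2.length := Nat.gcd_pos_of_pos_left _ hp1
  have hdvd : d ∣ Nat.gcd l1.length l2.length :=
    Nat.dvd_gcd (Nat.dvd_of_mod_eq_zero hm1) (Nat.dvd_of_mod_eq_zero hm2)
  have := Nat.le_of_dvd hgpos hdvd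
  omega

-- str1[:g] is the g-prefix of str1's code points
theorem slice_take (s : String) (g : Nat) :
    PySem.Str.slice s none (some (g : Int)) = String.ofList (s.toList.take g) := by
  apply String.toList_inj.mp
  simp [PySem.Str.toList_slice, PySem.List.slice_to_natCast]

-- ===== VERDICT (by name: the statement is the Claim_ definition above) =====
theorem greatestCommonDivisorOfStrings_spec : Claim_equal_greatestCommonDivisorOfStrings := by
  intro str1 str2 _
  unfold Spec_greatestCommonDivisorOfStrings greatestCommonDivisorOfStrings greatestCommonDivisorOfStrings_alt
  simp only [gcdsWhile_max]
  by_cases hcomm : str1.toList ++ str2.toList = str2.toList ++ str1.toList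
  · rw [if_pos hcomm, slice_take]
    rcases eq_or_ne str1.toList [] with hnil | h1
    · -- str1 = "": A returns the empty slice; B's scan never hits (a hit would force str2 = "" too)
      rw [hnil]
      simp only [List.take_nil]
      have hofnil : String.ofList ([] : List Char) = "" := rfl
      rw [hofnil]
      refine Eq.symm (gcdsScan_none _ _ _ ?_)
      intro d hd1 hdD hc
      have h2 := hc.2.2
      have hlen : str2.toList.length = 0 := by rw [← h2]; simp
      simp only [List.length_nil] at hdD
      omega
    · -- str1 ≠ "": both sides are the gcd-length prefix of str1
      have hp1 : 0 < str1.toList.length := List.length_pos_iff.mpr h1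
      have hit := gcdsScan_hit str1.toList str2.toList
        (max str1.toList.length str2.toList.length)
        (Nat.gcd str1.toList.length str2.toList.length)
        (scanCond_gcd _ _ hcomm h1)
        (Nat.gcd_pos_of_pos_left _ hp1)
        (le_trans (Nat.gcd_le_left _ hp1) (le_max_left _ _))
        (fun d hd _ => scanCond_above _ _ d h1 hd)
      rw [hit]
  · rw [if_neg hcomm]
    refine Eq.symm (gcdsScan_none _ _ _ ?_)
    intro d _ _ hc
    exact absurd (scanCond_comm _ _ d hc) hcomm
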